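-- pv_equiv track=rewrite | github.com/ivanbenas/cbom_generation_analysis | crypto_defs_loader.py | _pattern_to_regex_inner
-- ===== SOURCE A (Python) =====
-- def _pattern_to_regex_inner(s: str) -> str:
--     """Convert inner part of optional group."""
--     out = []
--     i = 0
--     while i < len(s):
--         c = s[i]
--         if c == "{":
--             j = s.find("}", i)
--             if j >= 0:
--                 out.append(r"[^\s\-]+")
--                 i = j + 1
--                 continue
--         if c in ".+*?\\":
--             out.append("\\" + c)
--         else:
--             out.append(c)
--         i += 1
--     return "".join(out)
-- ===== SOURCE B (Python) =====
-- import re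
--
-- def _pattern_to_regex_inner(s: str) -> str:
--     """Convert inner part of optional group (tokenize with one regex pass)."""
--     out = []
--     for m in re.finditer(r'\{[^}]*\}|[\s\S]', s):
--         t = m.group(0)
--         if len(t) > 1:          # a {...} group
--             out.append(r"[^\s\-]+")
--         elif t in ".+*?\\":
--             out.append("\\" + t)
--         else:
--             out.append(t)
--     return "".join(out)
-- ===== Notes on version B (the rewrite author's own statement) =====
-- stated objective: idiomatic
-- what changed: Replaced the manual index/while loop with s.find brace scanning by a single re.finditer tokenization pass (brace-group alternative first, [\s\S] for single chars) followed by a per-token translation.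
import Mathlib
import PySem

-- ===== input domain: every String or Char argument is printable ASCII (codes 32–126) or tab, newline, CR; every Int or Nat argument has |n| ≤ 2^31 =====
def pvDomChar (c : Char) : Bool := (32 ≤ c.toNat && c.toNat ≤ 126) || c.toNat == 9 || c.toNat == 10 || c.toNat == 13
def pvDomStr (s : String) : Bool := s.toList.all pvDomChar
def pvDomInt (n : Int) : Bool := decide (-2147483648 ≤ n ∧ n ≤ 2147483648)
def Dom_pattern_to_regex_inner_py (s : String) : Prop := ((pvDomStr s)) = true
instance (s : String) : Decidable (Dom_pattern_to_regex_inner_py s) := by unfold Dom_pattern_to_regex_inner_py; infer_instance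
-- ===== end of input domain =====

-- B replaces A's index/while loop and s.find scanning by a one-pass regex tokenization
-- (brace group or single char) followed by a per-token translation; same return value.

-- ===== PORT A =====
-- the characters of ".+*?\\"
def pvSpecials : List Char := ['.', '+', '*', '?', '\\']

-- s.find("}", i) relative to the current suffix: index of the first '}' (none = -1)
def pvFindClose : List Char → Option Nat
  | [] => none
  | c :: r => if c = '}' then some 0 else (pvFindClose r).map (· + 1)

-- the while loop of A, as structural recursion on the suffix starting at i
def pvGoA : List Char → List Char
  | [] => []
  | c :: rest =>
    if c = '{' then
      match pvFindClose (c :: rest) with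
      | some j => "[^\\s\\-]+".toList ++ pvGoA ((c :: rest).drop (j + 1))
      | none => (if c ∈ pvSpecials then ['\\', c] else [c]) ++ pvGoA rest
    else (if c ∈ pvSpecials then ['\\', c] else [c]) ++ pvGoA rest
termination_by l => l.length
decreasing_by all_goals simp

def pattern_to_regex_inner_py (s : String) : String := String.ofList (pvGoA s.toList)

-- ===== PORT B =====
-- re.finditer(r'\{[^}]*\}|[\s\S]', s): the brace-group alternative is tried first,
-- otherwise one single character is consumed.
def pvTokens : List Char → List (List Char)
  | [] => []
  | c :: rest =>
    if c = '{' then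
      match _h : rest.dropWhile (· != '}') with
      | _ :: r => (c :: (rest.takeWhile (· != '}') ++ ['}'])) :: pvTokens r
      | [] => [c] :: pvTokens rest
    else [c] :: pvTokens rest
termination_by l => l.length
decreasing_by
  all_goals simp
  all_goals (have h1 := List.length_dropWhile_le (· != '}') rest; rw [_h] at h1;
             simp at h1; omega)

-- the loop body: len(t) > 1 is a brace group; a single char is escaped if special
def pvSpecialsB : List Char := ".+*?\\".toList
def pvTrans : List Char → List Char
  | [c] => if c ∈ pvSpecialsB then ['\\', c] else [c]
  | _ => "[^\\s\\-]+".toList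

def pattern_to_regex_inner_py_alt (s : String) : String :=
  String.ofList ((pvTokens s.toList).flatMap pvTrans)

-- ===== PRECONDITION & SPEC =====
def Spec_pattern_to_regex_inner_py (s : String) (out : String) : Prop := out = pattern_to_regex_inner_py_alt s
instance (s : String) (out : String) : Decidable (Spec_pattern_to_regex_inner_py s out) := by unfold Spec_pattern_to_regex_inner_py; infer_instance

-- ===== CLAIM (what is proved, stated in full; the proofs are below) =====
def Claim_equal_pattern_to_regex_inner_py : Prop := ∀ (s : String), Dom_pattern_to_regex_inner_py s → Spec_pattern_to_regex_inner_py s (pattern_to_regex_inner_py s)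

-- ===== LEMMAS AND PROOFS =====

lemma pvFindClose_none {l : List Char} (h : pvFindClose l = none) :
    l.dropWhile (· != '}') = [] := by
  induction l with
  | nil => rfl
  | cons c r ih =>
    by_cases hc : c = '}'
    · simp [pvFindClose, hc] at h
    · simp [pvFindClose, hc] at h
      simp [hc, ih h]

lemma pvFindClose_some {l : List Char} {j : Nat} (h : pvFindClose l = some j) :
    l.dropWhile (· != '}') = '}' :: l.drop (j + 1) := by
  induction l generalizing j with
  | nil => simp [pvFindClose] at h
  | cons c r ih =>
    by_cases hc : c = '}'
    · simp [pvFindClose, hc] at h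
      subst hc; simp [← h]
    · simp [pvFindClose, hc] at h
      obtain ⟨j', hj', rfl⟩ := h
      simp [hc, ih hj']

lemma pvTrans_group (c b : Char) (t : List Char) :
    pvTrans (c :: (t ++ [b])) = "[^\\s\\-]+".toList := by
  cases t <;> rfl

lemma pvGoA_eq_alt (l : List Char) : pvGoA l = (pvTokens l).flatMap pvTrans := by
  induction l using pvGoA.induct with
  | case1 => simp [pvGoA, pvTokens]
  | case2 r j hfind ih =>
    have hne : ('{' : Char) ≠ '}' := by decide
    have hfind' := hfind
    simp only [pvFindClose, if_neg hne] at hfind'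
    obtain ⟨j', hj', rfl⟩ : ∃ j', pvFindClose r = some j' ∧ j = j' + 1 := by
      cases hr : pvFindClose r <;> simp [hr] at hfind'
      simp [hfind'.symm]
    have hdw := pvFindClose_some hj'
    rw [pvGoA, pvTokens, if_pos rfl, if_pos rfl, hfind, hdw]
    simp only [List.drop_succ_cons, List.flatMap_cons,
      pvTrans_group '{' '}' (r.takeWhile (· != '}'))]
    rw [List.drop_succ_cons] at ih
    rw [ih]
  | case3 r hfind ih =>
    have hne : ('{' : Char) ≠ '}' := by decide
    have hfind' := hfind
    simp only [pvFindClose, if_neg hne, Option.map_eq_none_iff] at hfind'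
    have hdw := pvFindClose_none hfind'
    rw [pvGoA, pvTokens, if_pos rfl, if_pos rfl, hfind, hdw]
    simp only [List.flatMap_cons, pvTrans]
    rw [ih]
    simp only [pvSpecials, pvSpecialsB]
    rfl
  | case4 c r hc ih =>
    rw [pvGoA, pvTokens, if_neg hc, if_neg hc]
    simp only [List.flatMap_cons, pvTrans]
    rw [ih]
    simp only [pvSpecials, pvSpecialsB]
    rfl

-- ===== VERDICT (by name: the statement is the Claim_ definition above) =====
theorem pattern_to_regex_inner_py_spec : Claim_equal_pattern_to_regex_inner_py := by
  intro s _
  unfold Spec_pattern_to_regex_inner_py pattern_to_regex_inner_py pattern_to_regex_inner_py_alt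
  rw [pvGoA_eq_alt]
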